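-- pv_equiv track=rewrite | github.com/MuhammaadSaad/AdventofCode | 2024/07/program.py | can_make_true
-- ===== SOURCE A (Python) =====
-- from itertools import product
--
-- def evaluate_expression(numbers, operators):
--     """Evaluate the expression based on the numbers and operators provided."""
--     result = numbers[0]
--     for i in range(len(operators)):
--         if operators[i] == '+':
--             result += numbers[i + 1]
--         elif operators[i] == '*':
--             result *= numbers[i + 1]
--         elif operators[i] == '||':
--             result = int(str(result) + str(numbers[i + 1]))  # Concatenate numbers
--
--     return result
--
-- def can_make_true(test_value, numbers,part2=False):
--     """Check if the test value can be made true with the given numbers."""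
--     n = len(numbers)
--     # Generate all combinations of operators (+, *) for the positions between numbers
--
--     if part2:
--         for operators in product(['+', '*', '||'], repeat=n-1):
--             if evaluate_expression(numbers, operators) == test_value:
--                 return True
--     else:
--         for operators in product(['+', '*'], repeat=n-1):
--             if evaluate_expression(numbers, operators) == test_value:
--                 return True
--     return False
-- ===== SOURCE B (Python) =====
-- def can_make_true(test_value, numbers, part2=False):
--     """Check if the test value can be made true with the given numbers.
--
--     DFS over partial results: each prefix value is computed once and shared
--     by all completions, with early exit on the first match."""
--     def dfs(acc, rest):
--         if not rest:
--             return acc == test_value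
--         x, xs = rest[0], rest[1:]
--         return (dfs(acc + x, xs) or dfs(acc * x, xs)
--                 or (part2 and dfs(int(str(acc) + str(x)), xs)))
--     return dfs(numbers[0], numbers[1:])
-- ===== Notes on version B (the rewrite author's own statement) =====
-- stated objective: alternative
-- what changed: A materialises every operator tuple with itertools.product and re-evaluates each full expression from scratch; B does a recursive DFS over partial results so each prefix value is computed once and shared by all completions, with early exit on the first match (both remain exponential in the list length).
-- outside the precondition, e.g. on can_make_true(5, [], False): A raises ValueError, B raises IndexError; on can_make_true(-1, [2, -3], True): A returns True, B returns True; on can_make_true(99, [2, -3], True): A raises ValueError, B raises ValueError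
import Mathlib
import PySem

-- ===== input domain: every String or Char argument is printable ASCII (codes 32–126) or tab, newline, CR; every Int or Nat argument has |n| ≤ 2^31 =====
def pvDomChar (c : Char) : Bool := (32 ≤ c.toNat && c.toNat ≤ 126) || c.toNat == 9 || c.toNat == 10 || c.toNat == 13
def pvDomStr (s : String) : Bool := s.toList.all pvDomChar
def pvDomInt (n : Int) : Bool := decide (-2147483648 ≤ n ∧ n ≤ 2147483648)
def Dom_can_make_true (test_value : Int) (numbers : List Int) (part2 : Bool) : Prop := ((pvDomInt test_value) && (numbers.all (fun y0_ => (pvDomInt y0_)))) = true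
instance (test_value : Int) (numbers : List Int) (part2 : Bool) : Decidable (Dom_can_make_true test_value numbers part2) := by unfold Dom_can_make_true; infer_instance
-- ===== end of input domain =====

-- ===== PORT A =====
-- B changes the search: DFS over shared partial results with early exit, instead of
-- re-evaluating every itertools.product operator tuple from scratch (objective: alternative).

-- int(str(a) + str(b)) — exact via PySem string conversion/parsing
def pyConcat (a b : Int) : Int :=
  (PySem.Int.ofStr? (PySem.Int.toStr a ++ PySem.Int.toStr b)).getD 0

-- evaluate_expression, literal: loop over range(len(operators)), indexing numbers[i+1]
def evaluate_expression (numbers : List Int) (operators : List String) : Int :=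
  (List.range operators.length).foldl
    (fun result i =>
      if operators.getD i "" = "+" then result + numbers.getD (i + 1) 0
      else if operators.getD i "" = "*" then result * numbers.getD (i + 1) 0
      else if operators.getD i "" = "||" then pyConcat result (numbers.getD (i + 1) 0)
      else result)
    (numbers.getD 0 0)

-- itertools.product(ops, repeat=k), in the same (lexicographic) order
def prodRep (ops : List String) : Nat → List (List String)
  | 0 => [[]]
  | k + 1 => ops.flatMap (fun o => (prodRep ops k).map (o :: ·))

def can_make_true (test_value : Int) (numbers : List Int) (part2 : Bool) : Bool :=
  let n := numbers.length
  if part2 then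
    (prodRep ["+", "*", "||"] (n - 1)).any
      (fun operators => evaluate_expression numbers operators == test_value)
  else
    (prodRep ["+", "*"] (n - 1)).any
      (fun operators => evaluate_expression numbers operators == test_value)

-- ===== PORT B =====
def dfsB (test_value : Int) (part2 : Bool) (acc : Int) : List Int → Bool
  | [] => acc == test_value
  | x :: xs =>
      dfsB test_value part2 (acc + x) xs || dfsB test_value part2 (acc * x) xs ||
        (part2 && dfsB test_value part2 (pyConcat acc x) xs)

def can_make_true_alt (test_value : Int) (numbers : List Int) (part2 : Bool) : Bool :=
  dfsB test_value part2 (numbers.getD 0 0) numbers.tail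

-- ===== PRECONDITION & SPEC =====
-- Pre_ excludes the inputs where Python A raises: the empty list (product repeat=-1,
-- ValueError) and part2 inputs with a negative number after the first, where the first
-- attempted concatenation int(str(r)+str(x)) raises ValueError unless an earlier operator
-- tuple already matched (B raises identically there).
def Pre_can_make_true (test_value : Int) (numbers : List Int) (part2 : Bool) : Prop :=
  numbers ≠ [] ∧ (part2 = true → ∀ x ∈ numbers.tail, 0 ≤ x)
instance (test_value : Int) (numbers : List Int) (part2 : Bool) : Decidable (Pre_can_make_true test_value numbers part2) := by unfold Pre_can_make_true; infer_instance

def pvWitness_can_make_true : Int × List Int × Bool := (156, [15, 6], true)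

def Spec_can_make_true (test_value : Int) (numbers : List Int) (part2 : Bool) (out : Bool) : Prop := out = can_make_true_alt test_value numbers part2
instance (test_value : Int) (numbers : List Int) (part2 : Bool) (out : Bool) : Decidable (Spec_can_make_true test_value numbers part2 out) := by unfold Spec_can_make_true; infer_instance

-- ===== CLAIM (what is proved, stated in full; the proofs are below) =====
def Claim_equal_can_make_true : Prop := ∀ (test_value : Int) (numbers : List Int) (part2 : Bool), Dom_can_make_true test_value numbers part2 → Pre_can_make_true test_value numbers part2 → Spec_can_make_true test_value numbers part2 (can_make_true test_value numbers part2)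

-- ===== LEMMAS AND PROOFS =====

-- the loop body of evaluate_expression, named for the proofs
def stepOp (r : Int) (o : String) (x : Int) : Int :=
  if o = "+" then r + x
  else if o = "*" then r * x
  else if o = "||" then pyConcat r x
  else r

-- the fold of evaluate_expression with the index shift removed: operand list starts at numbers[1]
def fold2 (a : Int) (ops : List String) (nums : List Int) : Int :=
  (List.range ops.length).foldl (fun r i => stepOp r (ops.getD i "") (nums.getD i 0)) a

theorem evaluate_expression_eq_fold2 (n0 : Int) (rest : List Int) (ops : List String) :
    evaluate_expression (n0 :: rest) ops = fold2 n0 ops rest := by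
  simp only [evaluate_expression, fold2, stepOp, List.getD_cons_succ, List.getD_cons_zero]

theorem fold2_nil (a : Int) (nums : List Int) : fold2 a [] nums = a := by
  simp [fold2]

theorem fold2_cons (a : Int) (o : String) (os : List String) (x : Int) (xs : List Int) :
    fold2 a (o :: os) (x :: xs) = fold2 (stepOp a o x) os xs := by
  unfold fold2
  rw [List.length_cons, List.range_succ_eq_map]
  simp [List.foldl_map]

theorem dfs_eq_search (tv : Int) (p2 : Bool) :
    ∀ (rest : List Int) (acc : Int),
      (prodRep (if p2 then ["+", "*", "||"] else ["+", "*"]) rest.length).any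
          (fun ops => fold2 acc ops rest == tv)
        = dfsB tv p2 acc rest := by
  intro rest
  induction rest with
  | nil =>
      intro acc
      simp [prodRep, fold2_nil, dfsB]
  | cons x xs ih =>
      intro acc
      show (prodRep _ (xs.length + 1)).any _ = _
      cases p2 <;> simp only [Bool.false_eq_true, if_false, if_true] at ih <;>
        simp [prodRep, List.any_flatMap, List.any_map, Function.comp_def,
          fold2_cons, stepOp, ih, dfsB, Bool.or_assoc]

theorem can_make_true_spec : Claim_equal_can_make_true := by
  intro tv numbers p2 _ hpre
  unfold Spec_can_make_true can_make_true can_make_true_alt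
  obtain ⟨hne, -⟩ := hpre
  cases numbers with
  | nil => exact absurd rfl hne
  | cons n0 rest =>
      have h := dfs_eq_search tv p2 rest n0
      cases p2 <;>
        simpa [List.length_cons, Nat.add_sub_cancel, evaluate_expression_eq_fold2] using h
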